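-- pv_equiv track=rewrite | github.com/sky712345678/TimeMaster | MainApp/chart.py | course_statics
-- ===== SOURCE A (Python) =====
-- def course_statics(npdata):
--     date = {}
--     time = {}
--     for i in npdata:
--         if i[0] in time:
--             date[i[0]].append(i[1])
--             time[i[0]].append(i[2])
--         else:
--             date[i[0]] = [i[1]]
--             time[i[0]] = [i[2]]
--     return date, time
-- ===== SOURCE B (Python) =====
-- def course_statics(npdata):
--     keys = list(dict.fromkeys(i[0] for i in npdata))
--     date = {k: [i[1] for i in npdata if i[0] == k] for k in keys}
--     time = {k: [i[2] for i in npdata if i[0] == k] for k in keys}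
--     return date, time
-- ===== Notes on version B (the rewrite author's own statement) =====
-- stated objective: alternative
-- what changed: Replaces A's single stateful pass maintaining two dicts with conditional insert/append by a declarative two-phase form: first collect the distinct keys in first-occurrence order (dict.fromkeys), then build each result dict by a per-key comprehension that filters the whole list.
import Mathlib
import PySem

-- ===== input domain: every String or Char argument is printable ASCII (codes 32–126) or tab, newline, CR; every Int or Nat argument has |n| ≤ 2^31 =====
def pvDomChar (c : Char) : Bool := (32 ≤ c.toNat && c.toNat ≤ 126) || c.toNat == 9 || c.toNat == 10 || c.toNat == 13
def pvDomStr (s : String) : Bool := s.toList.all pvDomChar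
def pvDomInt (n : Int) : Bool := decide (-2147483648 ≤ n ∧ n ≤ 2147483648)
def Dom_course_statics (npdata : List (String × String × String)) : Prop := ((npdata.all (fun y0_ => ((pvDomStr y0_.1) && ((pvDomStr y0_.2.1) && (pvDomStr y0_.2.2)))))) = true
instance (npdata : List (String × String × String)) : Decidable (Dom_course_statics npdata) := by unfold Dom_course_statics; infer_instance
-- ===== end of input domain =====

-- B rebuilds the same two dicts declaratively (distinct keys, then per-key filters) instead of A's single stateful pass; alternative decomposition, not faster.


-- ===== PORT A =====
-- one pass; two dicts built in step; 'i[0] in time' guards append vs first insert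
def course_statics (npdata : List (String × String × String)) : (List (String × List String)) × (List (String × List String)) :=
  let st := npdata.foldl
    (fun (st : PySem.Dict String (List String) × PySem.Dict String (List String)) i =>
      if st.2.contains i.1 then
        (st.1.modify i.1 [] (fun v => v ++ [i.2.1]), st.2.modify i.1 [] (fun v => v ++ [i.2.2]))
      else
        (st.1.insert i.1 [i.2.1], st.2.insert i.1 [i.2.2]))
    (PySem.Dict.empty, PySem.Dict.empty)
  (st.1.items, st.2.items)

-- ===== PORT B =====
-- distinct keys in first-occurrence order, then per-key comprehensions over the whole list
def course_statics_alt (npdata : List (String × String × String)) : (List (String × List String)) × (List (String × List String)) :=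
  let keys := PySem.List.dedup (npdata.map (fun i => i.1))
  (keys.map (fun k => (k, (npdata.filter (fun i => i.1 == k)).map (fun i => i.2.1))),
   keys.map (fun k => (k, (npdata.filter (fun i => i.1 == k)).map (fun i => i.2.2))))

-- ===== PRECONDITION & SPEC =====
def Spec_course_statics (npdata : List (String × String × String)) (out : (List (String × List String)) × (List (String × List String))) : Prop := out = course_statics_alt npdata
instance (npdata : List (String × String × String)) (out : (List (String × List String)) × (List (String × List String))) : Decidable (Spec_course_statics npdata out) := by unfold Spec_course_statics; infer_instance

-- ===== CLAIM (what is proved, stated in full; the proofs are below) =====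
def Claim_equal_course_statics : Prop := ∀ (npdata : List (String × String × String)), Dom_course_statics npdata → Spec_course_statics npdata (course_statics npdata)

-- ===== LEMMAS AND PROOFS =====

-- A's paired loop splits into two independent modify-folds as long as both dicts answer `contains` alike
lemma foldA_split (l : List (String × String × String))
    (d t : PySem.Dict String (List String))
    (h : ∀ k, d.contains k = t.contains k) :
    l.foldl
      (fun (st : PySem.Dict String (List String) × PySem.Dict String (List String)) i =>
        if st.2.contains i.1 then
          (st.1.modify i.1 [] (fun v => v ++ [i.2.1]), st.2.modify i.1 [] (fun v => v ++ [i.2.2]))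
        else
          (st.1.insert i.1 [i.2.1], st.2.insert i.1 [i.2.2])) (d, t)
      = (l.foldl (fun d i => d.modify i.1 [] (fun v => v ++ [i.2.1])) d,
         l.foldl (fun t i => t.modify i.1 [] (fun v => v ++ [i.2.2])) t) := by
  induction l generalizing d t with
  | nil => rfl
  | cons i l ih =>
    simp only [List.foldl_cons]
    have hinv : ∀ (vd vt : List String) k,
        (d.insert i.1 vd).contains k = (t.insert i.1 vt).contains k := by
      intro vd vt k
      rw [PySem.Dict.contains_insert, PySem.Dict.contains_insert, h k]
    by_cases hc : t.contains i.1 = true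
    · rw [if_pos hc]
      exact ih _ _ (fun k => by
        simp only [PySem.Dict.modify]; exact hinv _ _ k)
    · rw [if_neg hc]
      have hd : d.contains i.1 = false := by rw [h]; simpa using hc
      have ht : t.contains i.1 = false := by simpa using hc
      have ed : d.modify i.1 [] (fun v => v ++ [i.2.1]) = d.insert i.1 [i.2.1] := by
        simp [PySem.Dict.modify, PySem.Dict.getD_of_not_contains d [] hd]
      have et : t.modify i.1 [] (fun v => v ++ [i.2.2]) = t.insert i.1 [i.2.2] := by
        simp [PySem.Dict.modify, PySem.Dict.getD_of_not_contains t [] ht]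
      rw [ed, et]
      exact ih _ _ (fun k => hinv _ _ k)

-- each modify-fold's items are exactly B's per-key comprehension over the distinct keys
lemma fold_modify_items (npdata : List (String × String × String))
    (g : String × String × String → String) :
    (npdata.foldl (fun d i => d.modify i.1 [] (fun v => v ++ [g i]))
        (PySem.Dict.empty : PySem.Dict String (List String))).items
      = (PySem.List.dedup (npdata.map (fun i => i.1))).map
          (fun k => (k, (npdata.filter (fun i => i.1 == k)).map (fun i => g i))) := by
  have hnodup : (npdata.foldl (fun d i => d.modify i.1 [] (fun v => v ++ [g i]))
      (PySem.Dict.empty : PySem.Dict String (List String))).keys.Nodup :=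
    PySem.Dict.nodup_keys_foldl_modify_key npdata (fun i => i.1) []
      (fun _ i v => v ++ [g i]) PySem.Dict.empty (by simp)
  rw [PySem.Dict.items_eq_map_keys _ hnodup []]
  rw [PySem.Dict.keys_foldl_modify_key npdata (fun i => i.1) []
      (fun _ i v => v ++ [g i]) PySem.Dict.empty]
  have hupd : PySem.Set.update
      (PySem.Dict.empty : PySem.Dict String (List String)).keys
      (npdata.map (fun i => i.1)) = PySem.List.dedup (npdata.map (fun i => i.1)) := rfl
  rw [hupd]
  refine List.map_congr_left ?_
  intro k _
  have hfold : npdata.foldl (fun d i => d.modify i.1 [] (fun v => v ++ [g i]))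
      (PySem.Dict.empty : PySem.Dict String (List String))
      = (npdata.map (fun i => (i.1, g i))).foldl
          (fun d p => d.modify p.1 [] (fun v => v ++ [p.2])) PySem.Dict.empty :=
    by rw [List.foldl_map]
  have hget : (npdata.foldl (fun d i => d.modify i.1 [] (fun v => v ++ [g i]))
      (PySem.Dict.empty : PySem.Dict String (List String))).getD k []
      = (npdata.filter (fun i => i.1 == k)).map (fun i => g i) := by
    rw [hfold, PySem.Dict.getD_foldl_modify_append]
    simp [List.filter_map, Function.comp_def]
  rw [hget]

-- ===== VERDICT (by name: the statement is the Claim_ definition above) =====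
theorem course_statics_spec : Claim_equal_course_statics := by
  intro npdata _
  unfold Spec_course_statics course_statics course_statics_alt
  rw [foldA_split npdata PySem.Dict.empty PySem.Dict.empty (fun k => by simp)]
  simp only [fold_modify_items npdata (fun i => i.2.1),
             fold_modify_items npdata (fun i => i.2.2)]
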